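-- pv_equiv track=rewrite | github.com/youjunl/DNA-Tree-based-Clustering | msclust/core.py | compute_bsd
-- ===== SOURCE A (Python) =====
-- def compute_bsd(iv1, iv2):
--     # compute hamming distance between indicator vectors
--     ans = 0
--     if len(iv1) < len(iv2):
--         iv1, iv2 = iv2, iv1
--     for i in range(len(iv2)):
--         ans += iv1[i] ^ iv2[i] # xor
--     for i in range(len(iv2), len(iv1)):
--         ans += iv1[i]
--     return ans
-- ===== SOURCE B (Python) =====
-- def compute_bsd(iv1, iv2):
--     # compute hamming distance between indicator vectors,
--     # via the two's-complement identity x ^ y == x + y - 2*(x & y):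
--     # total = sum of both vectors minus twice the overlap's AND-sum
--     # (tail elements of the longer vector pair with 0 and contribute themselves).
--     return sum(iv1) + sum(iv2) - 2 * sum(a & b for a, b in zip(iv1, iv2))
-- ===== Notes on version B (the rewrite author's own statement) =====
-- stated objective: alternative
-- what changed: Replaced A's swap-and-two-index-loops XOR accumulation with an arithmetic formulation based on the two's-complement identity x ^ y == x + y - 2*(x & y): B returns sum(iv1) + sum(iv2) - 2 * sum(a & b over the zipped overlap), with no swap, no indexing and no tail loop.
import Mathlib
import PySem

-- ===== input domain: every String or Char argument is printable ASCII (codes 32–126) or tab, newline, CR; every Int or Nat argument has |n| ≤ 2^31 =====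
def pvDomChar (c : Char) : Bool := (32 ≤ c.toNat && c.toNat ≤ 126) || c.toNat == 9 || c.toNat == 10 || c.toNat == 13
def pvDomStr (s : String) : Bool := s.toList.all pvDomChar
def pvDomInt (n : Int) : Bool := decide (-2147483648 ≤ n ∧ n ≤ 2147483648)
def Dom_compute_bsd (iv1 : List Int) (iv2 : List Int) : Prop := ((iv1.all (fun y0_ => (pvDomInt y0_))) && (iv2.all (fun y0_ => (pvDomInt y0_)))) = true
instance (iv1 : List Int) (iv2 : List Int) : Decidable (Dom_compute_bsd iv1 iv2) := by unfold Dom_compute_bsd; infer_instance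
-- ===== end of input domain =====

-- B replaces A's swap-and-two-index-loops XOR accumulation with the arithmetic identity
-- x ^ y = x + y - 2*(x & y): three sums, no swap, no indexing, no tail loop (objective: alternative).

-- ===== PORT A =====
def compute_bsd (iv1 : List Int) (iv2 : List Int) : Int :=
  -- ans = 0; swap so that iv1 is the longer; two index loops, xor then tail addition
  let ans : Int := 0
  let p := if iv1.length < iv2.length then (iv2, iv1) else (iv1, iv2)
  let a := p.1
  let b := p.2
  let ans := (PySem.List.pyRange 0 (b.length : Int) 1).foldl
    (fun acc i => acc + PySem.Int.bxor (PySem.List.pyGetD a i 0) (PySem.List.pyGetD b i 0)) ans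
  let ans := (PySem.List.pyRange (b.length : Int) (a.length : Int) 1).foldl
    (fun acc i => acc + PySem.List.pyGetD a i 0) ans
  ans

-- ===== PORT B =====
-- sum(iv1) + sum(iv2) - 2 * sum(a & b for a, b in zip(iv1, iv2))
def compute_bsd_alt (iv1 : List Int) (iv2 : List Int) : Int :=
  iv1.sum + iv2.sum - 2 * (List.zipWith PySem.Int.band iv1 iv2).sum

-- ===== PRECONDITION & SPEC =====
def Spec_compute_bsd (iv1 : List Int) (iv2 : List Int) (out : Int) : Prop := out = compute_bsd_alt iv1 iv2
instance (iv1 : List Int) (iv2 : List Int) (out : Int) : Decidable (Spec_compute_bsd iv1 iv2 out) := by unfold Spec_compute_bsd; infer_instance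

-- ===== CLAIM (what is proved, stated in full; the proofs are below) =====
def Claim_equal_compute_bsd : Prop := ∀ (iv1 : List Int) (iv2 : List Int), Dom_compute_bsd iv1 iv2 → Spec_compute_bsd iv1 iv2 (compute_bsd iv1 iv2)

-- ===== LEMMAS AND PROOFS =====

-- the classical two's-complement carry identity, first on Nat …
theorem nat_add_eq_xor_add_two_and (n m : Nat) : n + m = (n ^^^ m) + 2 * (n &&& m) := by
  induction n using Nat.strong_induction_on generalizing m with
  | _ n ih =>
    rcases Nat.eq_zero_or_pos n with h0 | h0
    · subst h0; simp
    have ih2 := ih (n / 2) (Nat.div_lt_self h0 (by omega)) (m / 2)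
    have hxd : (n ^^^ m) / 2 = n / 2 ^^^ m / 2 := Nat.xor_div_two
    have had : (n &&& m) / 2 = n / 2 &&& m / 2 := Nat.and_div_two
    have hxm : (n ^^^ m) % 2 = (n + m) % 2 := Nat.xor_mod_two_eq
    have ham0 : (n &&& m) % 2 = n &&& (m % 2) := by
      rw [← Nat.and_one_is_mod (n &&& m), Nat.and_assoc, Nat.and_one_is_mod]
    rcases Nat.mod_two_eq_zero_or_one m with h' | h'
    · have ham : (n &&& m) % 2 = 0 := by rw [ham0, h']; simp
      omega
    · have ham : (n &&& m) % 2 = n % 2 := by rw [ham0, h', Nat.and_one_is_mod]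
      omega

theorem nat_add_eq_or_add_and (n m : Nat) : n + m = (n ||| m) + (n &&& m) := by
  induction n using Nat.strong_induction_on generalizing m with
  | _ n ih =>
    rcases Nat.eq_zero_or_pos n with h0 | h0
    · subst h0; simp
    have ih2 := ih (n / 2) (Nat.div_lt_self h0 (by omega)) (m / 2)
    have hod : (n ||| m) / 2 = n / 2 ||| m / 2 := Nat.or_div_two
    have had : (n &&& m) / 2 = n / 2 &&& m / 2 := Nat.and_div_two
    have ham0 : (n &&& m) % 2 = n &&& (m % 2) := by
      rw [← Nat.and_one_is_mod (n &&& m), Nat.and_assoc, Nat.and_one_is_mod]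
    have hom0 : (n ||| m) % 2 = (n % 2) ||| (m % 2) := by
      rw [← Nat.and_one_is_mod (n ||| m), Nat.and_or_distrib_right, Nat.and_one_is_mod,
          Nat.and_one_is_mod]
    rcases Nat.mod_two_eq_zero_or_one m with h' | h' <;>
      rcases Nat.mod_two_eq_zero_or_one n with h | h
    · have ham : (n &&& m) % 2 = 0 := by rw [ham0, h']; simp
      have hom : (n ||| m) % 2 = 0 := by rw [hom0, h, h']; decide
      omega
    · have ham : (n &&& m) % 2 = 0 := by rw [ham0, h']; simp
      have hom : (n ||| m) % 2 = 1 := by rw [hom0, h, h']; decide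
      omega
    · have ham : (n &&& m) % 2 = 0 := by rw [ham0, h', Nat.and_one_is_mod, h]
      have hom : (n ||| m) % 2 = 1 := by rw [hom0, h, h']; decide
      omega
    · have ham : (n &&& m) % 2 = 1 := by rw [ham0, h', Nat.and_one_is_mod, h]
      have hom : (n ||| m) % 2 = 1 := by rw [hom0, h, h']; decide
      omega

-- … then on Int, covering Python's infinite-two's-complement negatives
theorem int_add_eq_bxor_add_two_band (a b : Int) :
    a + b = PySem.Int.bxor a b + 2 * PySem.Int.band a b := by
  unfold PySem.Int.bxor PySem.Int.band
  by_cases ha : 0 ≤ a <;> by_cases hb : 0 ≤ b <;> simp only [ha, hb, if_pos, if_neg, not_false_iff]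
  · have h := nat_add_eq_xor_add_two_and a.toNat b.toNat
    omega
  · have h := nat_add_eq_xor_add_two_and a.toNat (-b - 1).toNat
    have hle : a.toNat &&& (-b - 1).toNat ≤ a.toNat := Nat.and_le_left
    omega
  · have h := nat_add_eq_xor_add_two_and (-a - 1).toNat b.toNat
    have hle : b.toNat &&& (-a - 1).toNat ≤ b.toNat := Nat.and_le_left
    have hc : (-a - 1).toNat &&& b.toNat = b.toNat &&& (-a - 1).toNat := Nat.and_comm _ _
    omega
  · have h := nat_add_eq_xor_add_two_and (-a - 1).toNat (-b - 1).toNat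
    have h2 := nat_add_eq_or_add_and (-a - 1).toNat (-b - 1).toNat
    omega

-- the indexed xor sum over range(len b) is the sum of the pointwise xor list
theorem range_sum_eq_zipWith_sum (a b : List Int) (h : b.length ≤ a.length) :
    ((List.range b.length).map (fun k => PySem.Int.bxor (a.getD k 0) (b.getD k 0))).sum
      = (List.zipWith PySem.Int.bxor a b).sum := by
  induction b generalizing a with
  | nil => simp
  | cons y ys ih =>
    cases a with
    | nil => simp at h
    | cons x xs =>
      simp only [List.length_cons, Nat.add_le_add_iff_right] at h
      simp only [List.length_cons]
      rw [List.range_succ_eq_map]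
      simp only [List.map_cons, List.map_map, List.sum_cons, List.zipWith_cons_cons]
      have : ((List.range ys.length).map
          ((fun k => PySem.Int.bxor ((x :: xs).getD k 0) ((y :: ys).getD k 0)) ∘ Nat.succ)).sum
          = ((List.range ys.length).map (fun k => PySem.Int.bxor (xs.getD k 0) (ys.getD k 0))).sum := by
        simp [Function.comp_def]
      rw [this, ih xs h]
      simp

-- A's body on an ordered pair (a,b), b not longer: xor sum over the overlap + tail sum
theorem loops_eval (a b : List Int) (h : b.length ≤ a.length) :
    ((PySem.List.pyRange (b.length : Int) (a.length : Int) 1).foldl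
        (fun acc i => acc + PySem.List.pyGetD a i 0)
      ((PySem.List.pyRange 0 (b.length : Int) 1).foldl
        (fun acc i => acc + PySem.Int.bxor (PySem.List.pyGetD a i 0) (PySem.List.pyGetD b i 0)) 0))
      = (List.zipWith PySem.Int.bxor a b).sum + (a.drop b.length).sum := by
  have h1 : ((PySem.List.pyRange 0 (b.length : Int) 1).foldl
      (fun acc i => acc + PySem.Int.bxor (PySem.List.pyGetD a i 0) (PySem.List.pyGetD b i 0)) 0)
      = (List.zipWith PySem.Int.bxor a b).sum := by
    rw [show (PySem.List.pyRange 0 (b.length : Int) 1) = PySem.List.pyRange 0 (b.length : Int) from rfl,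
        PySem.List.pyRange_zero_natCast]
    rw [List.foldl_map, PySem.List.foldl_add]
    simp only [PySem.List.pyGetD_natCast]
    rw [range_sum_eq_zipWith_sum a b h]
    ring
  rw [h1]
  have h2 := PySem.List.foldl_pyRange_pyGetD' a 0 (fun acc x => acc + x)
      ((List.zipWith PySem.Int.bxor a b).sum) (a := (b.length : Int)) (by positivity)
  simp only [Int.toNat_natCast] at h2
  rw [show (PySem.List.pyRange (b.length : Int) (a.length : Int) 1)
        = PySem.List.pyRange (b.length : Int) (a.length : Int) from rfl, h2]
  rw [PySem.List.foldl_add]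
  simp

-- xor-sum + tail-sum equals B's three-sums formula (b not longer than a)
theorem abstract_eq (a b : List Int) (h : b.length ≤ a.length) :
    (List.zipWith PySem.Int.bxor a b).sum + (a.drop b.length).sum
      = a.sum + b.sum - 2 * (List.zipWith PySem.Int.band a b).sum := by
  induction b generalizing a with
  | nil => simp
  | cons y ys ih =>
    cases a with
    | nil => simp at h
    | cons x xs =>
      simp only [List.length_cons, Nat.add_le_add_iff_right] at h
      simp only [List.zipWith_cons_cons, List.sum_cons, List.drop_succ_cons, List.length_cons]
      have hi := ih xs h
      have hx := int_add_eq_bxor_add_two_band x y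
      linarith

-- B's formula is symmetric in its two arguments
theorem alt_comm (a b : List Int) : compute_bsd_alt a b = compute_bsd_alt b a := by
  unfold compute_bsd_alt
  have : List.zipWith PySem.Int.band a b = List.zipWith PySem.Int.band b a := by
    induction a generalizing b with
    | nil => cases b <;> simp
    | cons x xs ih =>
      cases b with
      | nil => simp
      | cons y ys => simp [ih, PySem.Int.band_comm x y]
  rw [this]; ring

-- ===== VERDICT (by name: the statement is the Claim_ definition above) =====
theorem compute_bsd_spec : Claim_equal_compute_bsd := by
  intro iv1 iv2 _
  unfold Spec_compute_bsd compute_bsd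
  by_cases hlt : iv1.length < iv2.length
  · simp only [hlt, if_pos]
    rw [loops_eval iv2 iv1 (le_of_lt hlt), abstract_eq iv2 iv1 (le_of_lt hlt), alt_comm]
    unfold compute_bsd_alt
    rfl
  · simp only [hlt, if_neg, not_false_iff]
    rw [loops_eval iv1 iv2 (le_of_not_gt hlt), abstract_eq iv1 iv2 (le_of_not_gt hlt)]
    unfold compute_bsd_alt
    rfl
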